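-- pv_equiv track=rewrite | github.com/ZhenshengLee/nv_driveworks | driveworks-520/src/dwcgf/description/dwcgf/transformation/object_model/graphlet.py | resolve_id
-- ===== SOURCE A (Python) =====
-- def resolve_id(full_id: str) -> str:
--     """Remove the __self__ in the full_id. __self__ means this component.
--
--     Examples:
--     - __self__                  =>  __self__
--     - __self__.foo.bar          => foo.bar
--     - __self__.__self__         => __self__
--     - foo.__self__.__self__.bar => foo.bar
--     - foo.__self__.bar.__self__ => foo.bar
--     - foo.bar                   => foo.bar
--     - foo                       => foo
--     - <empty>                   => <empty>
--     - .foo                      => <exception>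
--     - foo..bar                  => <exception>
--     - foo.bar.                  => <exception>
--     """
--     ids = full_id.split(".")
--     if len([name for name in ids if name == ""]) > 0:
--         raise ValueError(f"Invalid component ID: '{full_id}'")
--     if len(ids) <= 1:
--         return full_id
--     else:
--         # take first name no matter what
--         new_ids = [ids[0]]
--
--         # remove all "__self__" begin from second name
--         for name in ids[1:]:
--             if name != "__self__":
--                 new_ids.append(name)
--
--         # remove first "__self__" if there is other name
--         if len(new_ids) >= 2 and new_ids[0] == "__self__":
--             new_ids = new_ids[1:]
--         return ".".join(new_ids)
-- ===== SOURCE B (Python) =====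
-- def resolve_id(full_id: str) -> str:
--     tokens = full_id.split(".")
--     if "" in tokens:
--         raise ValueError(f"Invalid component ID: '{full_id}'")
--     kept = [t for t in tokens if t != "__self__"]
--     return ".".join(kept) if kept else "__self__"
-- ===== Notes on version B (the rewrite author's own statement) =====
-- stated objective: simpler
-- what changed: A keeps the first token unconditionally, filters '__self__' only from the tail, and then conditionally drops a leading '__self__'; B uniformly filters '__self__' from all tokens and returns the '__self__' sentinel when the filtered list is empty.
-- outside the precondition, e.g. on resolve_id('foo..bar'): A raises ValueError, B raises ValueError
import Mathlib
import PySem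

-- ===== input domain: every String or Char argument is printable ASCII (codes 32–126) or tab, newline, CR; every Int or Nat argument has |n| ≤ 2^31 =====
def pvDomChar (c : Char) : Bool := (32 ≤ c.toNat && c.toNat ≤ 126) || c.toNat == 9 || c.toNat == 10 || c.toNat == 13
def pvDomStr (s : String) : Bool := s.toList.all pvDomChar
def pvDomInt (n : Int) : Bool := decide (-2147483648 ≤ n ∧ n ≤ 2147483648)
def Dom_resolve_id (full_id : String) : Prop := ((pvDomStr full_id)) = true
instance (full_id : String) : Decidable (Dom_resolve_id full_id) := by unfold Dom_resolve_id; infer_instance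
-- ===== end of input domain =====

-- B strips '__self__' with one uniform filter over all tokens (empty result ⇒ '__self__') instead of
-- A's keep-first / filter-tail / conditional-drop-of-the-first structure: simpler.

-- ===== PORT A =====
def resolve_id (full_id : String) : String :=
  -- ids = full_id.split("."): the separator "." is a non-empty literal, so Python's split is exactly Chars.splitOn
  let ids : List String := (PySem.Chars.splitOn full_id.toList ['.']).map String.ofList
  if (ids.filter (fun name => name == "")).length > 0 then
    full_id  -- Python: raise ValueError — excluded by Pre_resolve_id
  else if ids.length ≤ 1 then
    full_id
  else
    -- new_ids = [ids[0]]; for name in ids[1:]: if name != "__self__": new_ids.append(name)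
    -- (in this branch ids is non-empty, so ids[0] is ids.headI)
    let new_ids := (ids.drop 1).foldl
      (fun acc name => if name != "__self__" then acc ++ [name] else acc) [ids.headI]
    -- if len(new_ids) >= 2 and new_ids[0] == "__self__": new_ids = new_ids[1:]
    let new_ids := if 2 ≤ new_ids.length ∧ new_ids.headI = "__self__" then new_ids.drop 1 else new_ids
    PySem.Str.join "." new_ids

-- ===== PORT B =====
def resolve_id_alt (full_id : String) : String :=
  let tokens : List String := (PySem.Chars.splitOn full_id.toList ['.']).map String.ofList
  if tokens.contains "" then full_id  -- Python: raise ValueError — excluded by Pre_resolve_id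
  else
    let kept := tokens.filter (fun t => t != "__self__")
    if kept.isEmpty then "__self__" else PySem.Str.join "." kept

-- ===== PRECONDITION & SPEC =====
-- Pre_ excludes exactly the inputs with an empty dotted token (leading/trailing/double dot, or the
-- empty string), on which both A and B raise ValueError.
def Pre_resolve_id (full_id : String) : Prop :=
  "" ∉ (PySem.Chars.splitOn full_id.toList ['.']).map String.ofList
instance (full_id : String) : Decidable (Pre_resolve_id full_id) := by
  unfold Pre_resolve_id; infer_instance
def pvWitness_resolve_id : String := "foo.__self__.bar"
def Spec_resolve_id (full_id : String) (out : String) : Prop := out = resolve_id_alt full_id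
instance (full_id : String) (out : String) : Decidable (Spec_resolve_id full_id out) := by
  unfold Spec_resolve_id; infer_instance

-- ===== CLAIM (what is proved, stated in full; the proofs are below) =====
def Claim_equal_resolve_id : Prop := ∀ (full_id : String), Dom_resolve_id full_id → Pre_resolve_id full_id → Spec_resolve_id full_id (resolve_id full_id)

-- ===== LEMMAS AND PROOFS =====

-- splitOn's worker never returns the empty list
lemma pv_go_ne_nil (sep : List Char) :
    ∀ (fuel : Nat) (l cur : List Char) (acc : List (List Char)),
      PySem.Chars.splitOn.go sep fuel l cur acc ≠ [] := by
  intro fuel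
  induction fuel with
  | zero =>
    intro l cur acc
    rw [PySem.Chars.splitOn.go]
    simp
  | succ n ih =>
    intro l cur acc
    cases l with
    | nil =>
      rw [PySem.Chars.splitOn.go]
      · simp
      · omega
    | cons c rest =>
      rw [PySem.Chars.splitOn.go]
      split
      · exact ih _ _ _
      · exact ih _ _ _

lemma pv_splitOn_ne_nil (cs sep : List Char) : PySem.Chars.splitOn cs sep ≠ [] := by
  unfold PySem.Chars.splitOn
  exact pv_go_ne_nil sep _ _ _ _

-- join over a one-element extension on the right
lemma pv_join_append_singleton (sep : List Char) (A : List (List Char)) (b : List Char) :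
    PySem.Chars.join sep (A ++ [b]) =
      PySem.Chars.join sep A ++ (if A = [] then [] else sep) ++ b := by
  induction A with
  | nil => simp [PySem.Chars.join_nil, PySem.Chars.join_singleton]
  | cons x xs ih =>
    cases xs with
    | nil =>
      simp [PySem.Chars.join_singleton, PySem.Chars.join_cons_cons]
    | cons y ys =>
      simp only [List.cons_append] at ih ⊢
      rw [PySem.Chars.join_cons_cons, ih, PySem.Chars.join_cons_cons]
      simp

-- the worker's invariant: joining its result recovers the pending state
lemma pv_join_go (sep : List Char) (hsep : sep ≠ []) :
    ∀ (fuel : Nat) (l cur : List Char) (acc : List (List Char)), l.length < fuel →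
      PySem.Chars.join sep (PySem.Chars.splitOn.go sep fuel l cur acc) =
        PySem.Chars.join sep acc.reverse ++ (if acc = [] then [] else sep) ++ cur.reverse ++ l := by
  intro fuel
  induction fuel with
  | zero => intro l cur acc h; omega
  | succ n ih =>
    intro l cur acc h
    cases l with
    | nil =>
      rw [PySem.Chars.splitOn.go]
      · rw [show (cur.reverse :: acc).reverse = acc.reverse ++ [cur.reverse] by simp,
            pv_join_append_singleton]
        simp
      · omega
    | cons c rest =>
      rw [PySem.Chars.splitOn.go]
      split
      next hpre =>
        have h1 : 1 ≤ sep.length := List.length_pos_of_ne_nil hsep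
        have hlen : (List.drop sep.length (c :: rest)).length < n := by
          simp only [List.length_drop, List.length_cons] at *
          omega
        rw [ih _ _ _ hlen]
        obtain ⟨t, ht⟩ := List.isPrefixOf_iff_prefix.mp hpre
        have hdrop : List.drop sep.length (c :: rest) = t := by
          rw [← ht]; simp
        rw [show (cur.reverse :: acc).reverse = acc.reverse ++ [cur.reverse] by simp,
            pv_join_append_singleton]
        rw [hdrop, ← ht]
        simp
      next =>
        have hlen : rest.length < n := by
          simp only [List.length_cons] at h; omega
        rw [ih _ _ _ hlen]
        simp

-- sep.join(s.split(sep)) == s for a non-empty separator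
lemma pv_join_splitOn (cs sep : List Char) (hsep : sep ≠ []) :
    PySem.Chars.join sep (PySem.Chars.splitOn cs sep) = cs := by
  unfold PySem.Chars.splitOn
  rw [pv_join_go sep hsep _ _ _ _ (by omega)]
  simp [PySem.Chars.join_nil]

-- ".".join([t]) == t at the String level
lemma pv_str_join_singleton (t : String) : PySem.Str.join "." [t] = t := by
  apply String.toList_inj.mp
  rw [PySem.Str.toList_join]
  simp [PySem.Chars.join_singleton]

-- ===== VERDICT (by name: the statement is the Claim_ definition above) =====
theorem resolve_id_spec : Claim_equal_resolve_id := by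
  intro full_id _ hpre
  unfold Spec_resolve_id resolve_id resolve_id_alt
  unfold Pre_resolve_id at hpre
  simp only []
  cases hts : PySem.Chars.splitOn full_id.toList ['.'] with
  | nil => exact absurd hts (pv_splitOn_ne_nil _ _)
  | cons u ts =>
    have hjoin : PySem.Chars.join ['.'] (u :: ts) = full_id.toList := by
      rw [← hts]; exact pv_join_splitOn _ _ (by simp)
    rw [hts] at hpre
    have hcon : ((u :: ts).map String.ofList).contains "" = false := by
      simpa using hpre
    have hfil : (((u :: ts).map String.ofList).filter (fun name => name == "")).length = 0 := by
      simp only [List.length_eq_zero_iff, List.filter_eq_nil_iff]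
      intro a ha
      simp only [beq_iff_eq]
      intro h0
      exact hpre (h0 ▸ ha)
    rw [hfil, hcon]
    rw [if_neg (by omega : ¬ (0:Nat) > 0), if_neg (by simp : ¬ (false = true))]
    cases ts with
    | nil =>
      -- single token: A returns full_id, which IS that token
      have hfull : full_id = String.ofList u := by
        apply String.toList_inj.mp
        simpa [PySem.Chars.join_singleton] using hjoin.symm
      rw [if_pos (by simp : (List.map String.ofList [u]).length ≤ 1)]
      by_cases hu : String.ofList u = "__self__"
      · simp [List.filter, hu, hfull]
      · have hub : (String.ofList u != "__self__") = true := by simpa using hu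
        rw [show (List.map String.ofList [u]).filter (fun t => t != "__self__")
              = [String.ofList u] by simp [hub]]
        rw [if_neg (by simp), pv_str_join_singleton]
        exact hfull
    | cons v ts' =>
      -- at least two tokens
      rw [if_neg (by simp : ¬ (List.map String.ofList (u :: v :: ts')).length ≤ 1)]
      simp only [List.map_cons, List.drop_succ_cons, List.drop_zero, List.headI_cons]
      rw [PySem.List.foldl_append_if_eq_filter]
      set F := (String.ofList v :: List.map String.ofList ts').filter
        (fun t => t != "__self__") with hF
      by_cases ha : String.ofList u = "__self__"
      · -- first token is __self__
        have hub : (String.ofList u != "__self__") = false := by simpa using ha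
        have hkept : (String.ofList u :: String.ofList v :: List.map String.ofList ts').filter
            (fun t => t != "__self__") = F := by
          rw [List.filter_cons, hub]; simp [hF]
        rw [hkept]
        cases hFc : F with
        | nil =>
          -- everything was __self__: A joins ["__self__"], B returns the sentinel
          rw [if_neg (fun hc => by simp at hc)]
          rw [List.isEmpty_nil, if_pos rfl, List.append_nil, ha, pv_str_join_singleton]
        | cons f fs =>
          rw [if_pos ⟨by simp, by simpa using ha⟩]
          simp
      · -- first token kept by both
        have hub : (String.ofList u != "__self__") = true := by simpa using ha
        have hkept : (String.ofList u :: String.ofList v :: List.map String.ofList ts').filter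
            (fun t => t != "__self__") = String.ofList u :: F := by
          rw [List.filter_cons, hub]; simp [hF]
        rw [hkept]
        rw [if_neg (fun hc => ha (by simpa using hc.2))]
        rw [if_neg (by simp : ¬ ((String.ofList u :: F).isEmpty = true))]
        simp
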